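-- pv_equiv track=rewrite | github.com/meta-introspector/monster | onlyskills-repo/gpu_monster.py | hash_category
-- ===== SOURCE A (Python) =====
-- def hash_category(index: int) -> int:
--     """Fast category hash from ternary decomposition"""
--     hash_val = 0
--     n = index
--     for _ in range(20):
--         digit = n % 3
--         hash_val = (hash_val * 3 + digit) & 0xFFFFFFFFFFFFFFFF
--         n //= 3
--     return hash_val
-- ===== SOURCE B (Python) =====
-- def hash_category(index: int) -> int:
--     """Fast category hash from ternary decomposition (positional closed form)"""
--     hash_val = sum(((index // 3**i) % 3) * 3**(19 - i) for i in range(20))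
--     return hash_val & 0xFFFFFFFFFFFFFFFF
-- ===== Notes on version B (the rewrite author's own statement) =====
-- stated objective: alternative
-- what changed: Replaces the sequential loop threading a running quotient and a Horner-style accumulator through 20 masked steps with a direct closed-form sum: each ternary digit is obtained independently as (index // 3**i) % 3 and placed at weight 3**(19-i), with a single final mask.
import Mathlib
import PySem

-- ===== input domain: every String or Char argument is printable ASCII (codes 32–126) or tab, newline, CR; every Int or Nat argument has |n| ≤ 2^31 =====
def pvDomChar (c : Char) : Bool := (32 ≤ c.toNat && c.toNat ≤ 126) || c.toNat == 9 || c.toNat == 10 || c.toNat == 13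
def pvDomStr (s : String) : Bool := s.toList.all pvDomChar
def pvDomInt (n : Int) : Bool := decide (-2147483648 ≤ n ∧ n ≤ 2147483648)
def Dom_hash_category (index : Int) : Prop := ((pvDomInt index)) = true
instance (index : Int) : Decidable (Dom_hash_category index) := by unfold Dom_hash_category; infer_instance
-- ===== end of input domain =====

-- B computes each ternary digit positionally as (index // 3**i) % 3 and sums them at
-- reversed weights in one closed-form expression, instead of A's sequential loop that
-- threads a running quotient and a masked Horner accumulator (objective: alternative).


-- ===== PORT A =====
def hash_category (index : Int) : Int :=
  let s := (List.range 20).foldl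
    (fun (st : Int × Int) _ =>
      let digit := PySem.Int.mod st.2 3
      (PySem.Int.band (st.1 * 3 + digit) 0xFFFFFFFFFFFFFFFF, PySem.Int.floordiv st.2 3))
    (0, index)
  s.1

-- ===== PORT B =====
def hash_category_alt (index : Int) : Int :=
  let hash_val := (List.range 20).foldl
    (fun acc i => acc + PySem.Int.mod (PySem.Int.floordiv index ((3:Int)^i)) 3 * (3:Int)^(19 - i)) 0
  PySem.Int.band hash_val 0xFFFFFFFFFFFFFFFF

-- ===== PRECONDITION & SPEC =====
def Spec_hash_category (index : Int) (out : Int) : Prop := out = hash_category_alt index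
instance (index : Int) (out : Int) : Decidable (Spec_hash_category index out) := by unfold Spec_hash_category; infer_instance

-- ===== CLAIM (what is proved, stated in full; the proofs are below) =====
def Claim_equal_hash_category : Prop := ∀ (index : Int), Dom_hash_category index → Spec_hash_category index (hash_category index)

-- ===== LEMMAS AND PROOFS =====

-- Horner accumulator of the first k ternary digits of index (low digit first).
def pvH (index : Int) : ℕ → Int
  | 0 => 0
  | k + 1 => pvH index k * 3 + (index / (3:Int)^k) % 3

theorem pvH_nonneg (index : Int) (k : ℕ) : 0 ≤ pvH index k := by
  induction k with
  | zero => simp [pvH]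
  | succ k ih =>
    have h3 : (0:Int) < 3 := by norm_num
    have := Int.emod_nonneg (index / (3:Int)^k) (by norm_num : (3:Int) ≠ 0)
    simp only [pvH]; omega

theorem pvH_lt (index : Int) (k : ℕ) : pvH index k < 3^k := by
  induction k with
  | zero => simp [pvH]
  | succ k ih =>
    have := Int.emod_lt_of_pos (index / (3:Int)^k) (by norm_num : (0:Int) < 3)
    simp only [pvH, pow_succ]
    omega

theorem pv_mask_noop (x : Int) (h0 : 0 ≤ x) (h1 : x < 2^64) :
    PySem.Int.band x 0xFFFFFFFFFFFFFFFF = x := by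
  rw [PySem.Int.band_of_nonneg h0 (by norm_num)]
  have hm : (0xFFFFFFFFFFFFFFFF : Int).toNat = 2^64 - 1 := by decide
  rw [hm, Nat.and_two_pow_sub_one_eq_mod, Nat.mod_eq_of_lt]
  · omega
  · omega

theorem pv_loopA (index : Int) (k : ℕ) (hk : k ≤ 20) :
    (List.range k).foldl
      (fun (st : Int × Int) _ =>
        let digit := PySem.Int.mod st.2 3
        (PySem.Int.band (st.1 * 3 + digit) 0xFFFFFFFFFFFFFFFF, PySem.Int.floordiv st.2 3))
      (0, index)
    = (pvH index k, index / (3:Int)^k) := by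
  induction k with
  | zero => simp [pvH]
  | succ k ih =>
    rw [List.range_succ, List.foldl_append, ih (by omega)]
    simp only [List.foldl_cons, List.foldl_nil]
    have h3 : (0:Int) < 3 := by norm_num
    rw [PySem.Int.mod_eq_emod_of_pos h3, PySem.Int.floordiv_eq_ediv_of_pos h3]
    have hdiv : index / (3:Int)^k / 3 = index / (3:Int)^(k+1) := by
      rw [Int.ediv_ediv_of_nonneg (by positivity : (0:Int) ≤ 3^k), ← pow_succ]
    have hd0 := Int.emod_nonneg (index / (3:Int)^k) (by norm_num : (3:Int) ≠ 0)
    have hd1 := Int.emod_lt_of_pos (index / (3:Int)^k) h3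
    have hH0 := pvH_nonneg index k
    have hH1 := pvH_lt index k
    have hpow : (3:Int)^k ≤ 3^19 := pow_le_pow_right₀ (by norm_num) (by omega)
    have hbig : (3:Int)^19 * 3 < 2^64 := by norm_num
    rw [pv_mask_noop _ (by omega) (by nlinarith)]
    simp [pvH, hdiv]

theorem pv_sum_eq_H (index : Int) :
    (List.range 20).foldl
      (fun acc i => acc + PySem.Int.mod (PySem.Int.floordiv index ((3:Int)^i)) 3 * (3:Int)^(19 - i)) 0
    = pvH index 20 := by
  have h3 : (0:Int) < 3 := by norm_num
  have hfd : ∀ (a : Int) (i : ℕ), PySem.Int.floordiv a ((3:Int)^i) = a / (3:Int)^i :=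
    fun a i => PySem.Int.floordiv_eq_ediv_of_pos (by positivity)
  simp only [PySem.Int.mod_eq_emod_of_pos h3, hfd]
  simp [List.range_succ, pvH]
  ring

-- ===== VERDICT (by name: the statement is the Claim_ definition above) =====
theorem hash_category_spec : Claim_equal_hash_category := by
  intro index _
  unfold Spec_hash_category hash_category hash_category_alt
  rw [pv_loopA index 20 (by omega)]
  rw [pv_sum_eq_H]
  have hH0 := pvH_nonneg index 20
  have hH1 := pvH_lt index 20
  rw [pv_mask_noop _ hH0 (by nlinarith [(by norm_num : (3:Int)^20 < 2^64)])]
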